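-- pv_equiv track=rewrite | github.com/GANESHKUMAR2006/Leet-code-solutions | 1482-minimum-number-of-days-to-make-m-bouquets/1482-minimum-number-of-days-to-make-m-bouquets.py | check
-- ===== SOURCE A (Python) =====
-- def check(arr,day,m,k):
--     count=0
--     boq=0
--     for num in arr:
--         if num>day:
--             boq+=(count//k)
--             count=0
--         else:
--             count+=1
--     boq+=(count//k)
--     return boq>=m
-- ===== SOURCE B (Python) =====
-- def check(arr, day, m, k):
--     s = ''.join('1' if num <= day else '0' for num in arr)
--     return sum(len(seg) // k for seg in s.split('0')) >= m
-- ===== Notes on version B (the rewrite author's own statement) =====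
-- stated objective: idiomatic
-- what changed: Replaces the inline reset-counter loop by a run-length decomposition: build a '1'/'0' bloom string, split it on '0' into maximal bloomed segments, and sum len(seg)//k over the segments.
import Mathlib
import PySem

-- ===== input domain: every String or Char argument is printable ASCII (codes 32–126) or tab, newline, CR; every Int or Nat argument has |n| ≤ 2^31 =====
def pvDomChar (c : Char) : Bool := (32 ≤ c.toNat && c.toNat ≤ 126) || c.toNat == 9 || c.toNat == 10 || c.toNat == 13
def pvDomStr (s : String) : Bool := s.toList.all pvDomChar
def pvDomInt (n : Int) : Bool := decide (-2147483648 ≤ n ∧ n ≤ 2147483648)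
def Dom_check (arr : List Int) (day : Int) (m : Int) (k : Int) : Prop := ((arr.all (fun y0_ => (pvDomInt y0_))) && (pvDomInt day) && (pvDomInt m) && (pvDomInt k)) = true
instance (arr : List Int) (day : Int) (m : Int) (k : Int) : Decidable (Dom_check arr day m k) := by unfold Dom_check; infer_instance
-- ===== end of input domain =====

-- B replaces A's inline reset-counter loop by a run-length decomposition (build a
-- '1'/'0' bloom string, split on '0', sum len(seg)//k over segments); objective: idiomatic.

-- ===== PORT A =====
def check (arr : List Int) (day : Int) (m : Int) (k : Int) : Bool :=
  -- count=0; boq=0; for num in arr: …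
  let st := arr.foldl
    (fun (st : Int × Int) num =>
      if num > day then (0, st.2 + PySem.Int.floordiv st.1 k)
      else (st.1 + 1, st.2))
    (0, 0)
  -- boq += count//k; return boq >= m
  decide (st.2 + PySem.Int.floordiv st.1 k ≥ m)

-- ===== PORT B =====
def check_alt (arr : List Int) (day : Int) (m : Int) (k : Int) : Bool :=
  -- s = ''.join('1' if num<=day else '0' for num in arr)  (kept as its character list)
  let s : List Char := arr.map (fun num => if num ≤ day then '1' else '0')
  -- s.split('0') : sep ≠ '', ported via PySem.Chars.splitOn (exact str.split semantics)
  let segs := PySem.Chars.splitOn s ['0']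
  -- sum(len(seg)//k for seg in …) >= m
  decide ((segs.map (fun seg => PySem.Int.floordiv (Int.ofNat seg.length) k)).sum ≥ m)

-- ===== PRECONDITION & SPEC =====
-- Pre_ excludes only k = 0, where both Pythons raise ZeroDivisionError on '// k'.
def Pre_check (arr : List Int) (day : Int) (m : Int) (k : Int) : Prop := k ≠ 0
instance (arr : List Int) (day : Int) (m : Int) (k : Int) : Decidable (Pre_check arr day m k) := by unfold Pre_check; infer_instance
def pvWitness_check : List Int × Int × Int × Int := ([1, 10, 3, 10, 2], 3, 2, 1)

def Spec_check (arr : List Int) (day : Int) (m : Int) (k : Int) (out : Bool) : Prop := out = check_alt arr day m k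
instance (arr : List Int) (day : Int) (m : Int) (k : Int) (out : Bool) : Decidable (Spec_check arr day m k out) := by unfold Spec_check; infer_instance

-- ===== CLAIM (what is proved, stated in full; the proofs are below) =====
def Claim_equal_check : Prop := ∀ (arr : List Int) (day : Int) (m : Int) (k : Int), Dom_check arr day m k → Pre_check arr day m k → Spec_check arr day m k (check arr day m k)

-- ===== LEMMAS AND PROOFS =====

-- reference run-length list of the bloomed segments, seeded with a current run of length c
def pvRuns (day : Int) : List Int → Nat → List Nat
  | [], c => [c]
  | n :: t, c => if n > day then c :: pvRuns day t 0 else pvRuns day t (c + 1)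

-- splitOn-on-'0' with an explicit current-segment accumulator
def pvSplitAcc : List Char → List Char → List (List Char)
  | cur, [] => [cur.reverse]
  | cur, c :: t => if c = '0' then cur.reverse :: pvSplitAcc [] t else pvSplitAcc (c :: cur) t

theorem pvGo_eq (fuel : Nat) (l cur : List Char) (acc : List (List Char)) (h : l.length ≤ fuel) :
    PySem.Chars.splitOn.go ['0'] fuel l cur acc = acc.reverse ++ pvSplitAcc cur l := by
  induction fuel generalizing l cur acc with
  | zero =>
    have : l = [] := by cases l <;> simp_all
    subst this
    simp [PySem.Chars.splitOn.go, pvSplitAcc]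
  | succ fuel ih =>
    cases l with
    | nil => simp [PySem.Chars.splitOn.go, pvSplitAcc]
    | cons c rest =>
      simp only [List.length_cons, Nat.succ_le_succ_iff] at h
      by_cases hc : c = '0'
      · subst hc
        rw [show PySem.Chars.splitOn.go ['0'] (fuel + 1) ('0' :: rest) cur acc
              = PySem.Chars.splitOn.go ['0'] fuel rest [] (cur.reverse :: acc) by
            simp [PySem.Chars.splitOn.go, List.isPrefixOf]]
        rw [ih rest [] (cur.reverse :: acc) h]
        simp [pvSplitAcc]
      · have hfalse : List.isPrefixOf ['0'] (c :: rest) = false := by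
          simp only [List.isPrefixOf, Bool.and_true, beq_eq_false_iff_ne]
          exact fun h => hc h.symm
        rw [show PySem.Chars.splitOn.go ['0'] (fuel + 1) (c :: rest) cur acc
              = PySem.Chars.splitOn.go ['0'] fuel rest (c :: cur) acc by
            simp [PySem.Chars.splitOn.go, hfalse]]
        rw [ih rest (c :: cur) acc h]
        simp [pvSplitAcc, hc]

theorem pvSplitOn_eq (l : List Char) :
    PySem.Chars.splitOn l ['0'] = pvSplitAcc [] l := by
  have := pvGo_eq (l.length + 1) l [] [] (by omega)
  simpa [PySem.Chars.splitOn] using this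

-- segment lengths of the split of the bloom string are exactly the run lengths
theorem pvSplitAcc_lengths (day : Int) (arr : List Int) (cur : List Char) :
    (pvSplitAcc cur (arr.map (fun num => if num ≤ day then '1' else '0'))).map List.length
      = pvRuns day arr cur.length := by
  induction arr generalizing cur with
  | nil => simp [pvSplitAcc, pvRuns]
  | cons n t ih =>
    by_cases hn : n ≤ day
    · have h1 : ¬ ((if n ≤ day then '1' else '0') = '0') := by simp [hn]
      simp only [List.map_cons, hn, if_true]
      rw [show pvSplitAcc cur ('1' :: t.map (fun num => if num ≤ day then '1' else '0'))
            = pvSplitAcc ('1' :: cur) (t.map (fun num => if num ≤ day then '1' else '0')) by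
          simp [pvSplitAcc]]
      rw [ih ('1' :: cur)]
      simp [pvRuns, show ¬ n > day by omega]
    · simp only [List.map_cons, if_neg hn]
      rw [show pvSplitAcc cur ('0' :: t.map (fun num => if num ≤ day then '1' else '0'))
            = cur.reverse :: pvSplitAcc [] (t.map (fun num => if num ≤ day then '1' else '0')) by
          simp [pvSplitAcc]]
      simp only [List.map_cons]
      rw [ih []]
      simp [pvRuns, show n > day by omega]

-- A's loop computes boq + Σ (run // k) over the remaining runs
theorem pvLoopA (day k : Int) (arr : List Int) (c : Nat) (boq : Int) :
    (arr.foldl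
        (fun (st : Int × Int) num =>
          if num > day then (0, st.2 + PySem.Int.floordiv st.1 k)
          else (st.1 + 1, st.2))
        ((c : Int), boq)).2
      + PySem.Int.floordiv (arr.foldl
        (fun (st : Int × Int) num =>
          if num > day then (0, st.2 + PySem.Int.floordiv st.1 k)
          else (st.1 + 1, st.2))
        ((c : Int), boq)).1 k
    = boq + ((pvRuns day arr c).map (fun r => PySem.Int.floordiv (Int.ofNat r) k)).sum := by
  induction arr generalizing c boq with
  | nil => simp [pvRuns]
  | cons n t ih =>
    by_cases hn : n > day
    · simp only [List.foldl_cons, if_pos hn, pvRuns]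
      have := ih 0 (boq + PySem.Int.floordiv (c : Int) k)
      simp only [Int.ofNat_eq_natCast, Nat.cast_zero] at this ⊢
      rw [this]
      simp
      ring
    · simp only [List.foldl_cons, if_neg hn, pvRuns]
      have := ih (c + 1) boq
      simp only [Nat.cast_add, Nat.cast_one] at this
      rw [this]

-- ===== VERDICT (by name: the statement is the Claim_ definition above) =====
theorem check_spec : Claim_equal_check := by
  intro arr day m k _ _
  unfold Spec_check
  simp only [check, check_alt]
  rw [pvSplitOn_eq]
  have hsegs : (List.map (fun seg : List Char => PySem.Int.floordiv (Int.ofNat seg.length) k)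
      (pvSplitAcc [] (arr.map (fun num => if num ≤ day then '1' else '0')))).sum
      = ((pvRuns day arr 0).map (fun r => PySem.Int.floordiv (Int.ofNat r) k)).sum := by
    have h := pvSplitAcc_lengths day arr []
    simp only [List.length_nil] at h
    rw [← h, List.map_map]
    rfl
  rw [hsegs]
  have h2 := pvLoopA day k arr 0 0
  simp only [Nat.cast_zero] at h2
  rw [h2]
  simp
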